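-- pv_equiv track=rewrite | github.com/Itogab/tp_sintaxis_lexer | Automatas/Numeral.py | automata_numeral
-- ===== SOURCE A (Python) =====
-- ESTADO_FINAL = "ESTADO FINAL"
--
-- ESTADO_NO_FINAL = "NO ACEPTADO"
--
-- ESTADO_TRAMPA = "EN ESTADO TRAMPA"
--
-- def automata_numeral(lexema):
--     estado = 0
--     estados_finales = [1]
--     delta = {
--         0: {'#': 1}
--     }
--
--     for caracter in lexema:
--         if estado in delta and caracter in delta[estado]:
--             estado = delta[estado][caracter]
--         else:
--             estado = -1
--             break
--
--     if estado == -1: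
--         return ESTADO_TRAMPA
--     if estado in estados_finales:
--         return ESTADO_FINAL
--     else:
--         return ESTADO_NO_FINAL
-- ===== SOURCE B (Python) =====
-- ESTADO_FINAL = "ESTADO FINAL"
--
-- ESTADO_NO_FINAL = "NO ACEPTADO"
--
-- ESTADO_TRAMPA = "EN ESTADO TRAMPA"
--
-- def automata_numeral(lexema):
--     # Closed-form recognizer: the DFA accepts exactly "#", rejects "" in the
--     # non-final start state, and traps on every other string.
--     if lexema == '#':
--         return ESTADO_FINAL
--     if lexema == '':
--         return ESTADO_NO_FINAL
--     return ESTADO_TRAMPA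
-- ===== Notes on version B (the rewrite author's own statement) =====
-- stated objective: simpler
-- what changed: Replaces the character-by-character DFA walk over a transition dict with three direct whole-string comparisons ('#', '', otherwise trap).
import Mathlib
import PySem

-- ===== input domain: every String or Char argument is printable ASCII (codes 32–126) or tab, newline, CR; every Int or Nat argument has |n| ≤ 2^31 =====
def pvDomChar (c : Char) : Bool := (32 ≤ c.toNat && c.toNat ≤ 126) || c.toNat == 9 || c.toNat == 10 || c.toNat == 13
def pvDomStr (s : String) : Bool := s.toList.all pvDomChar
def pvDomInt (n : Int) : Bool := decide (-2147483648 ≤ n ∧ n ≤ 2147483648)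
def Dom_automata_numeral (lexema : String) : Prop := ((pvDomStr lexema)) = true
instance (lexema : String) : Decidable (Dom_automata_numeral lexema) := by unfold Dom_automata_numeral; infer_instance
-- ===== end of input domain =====

-- B replaces A's DFA table walk with three direct whole-string comparisons (simpler).


-- ===== PORT A =====
def pvESTADO_FINAL : String := "ESTADO FINAL"
def pvESTADO_NO_FINAL : String := "NO ACEPTADO"
def pvESTADO_TRAMPA : String := "EN ESTADO TRAMPA"

def pvDeltaA : PySem.Dict Int (PySem.Dict Char Int) :=
  PySem.Dict.mk [(0, PySem.Dict.mk [('#', (1 : Int))])]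

-- the for-loop with its break: on a missing transition set estado := -1 and stop
def pvLoopA (estado : Int) : List Char → Int
  | [] => estado
  | c :: cs =>
    match pvDeltaA.get? estado with
    | some row =>
      match row.get? c with
      | some e => pvLoopA e cs
      | none => -1
    | none => -1

def automata_numeral (lexema : String) : String :=
  let estados_finales : List Int := [1]
  let estado := pvLoopA 0 lexema.toList
  if estado = -1 then pvESTADO_TRAMPA
  else if estado ∈ estados_finales then pvESTADO_FINAL
  else pvESTADO_NO_FINAL

-- ===== PORT B =====
def automata_numeral_alt (lexema : String) : String :=
  if lexema.toList = ['#'] then pvESTADO_FINAL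
  else if lexema.toList = [] then pvESTADO_NO_FINAL
  else pvESTADO_TRAMPA

-- ===== PRECONDITION & SPEC =====
def Spec_automata_numeral (lexema : String) (out : String) : Prop := out = automata_numeral_alt lexema
instance (lexema : String) (out : String) : Decidable (Spec_automata_numeral lexema out) := by unfold Spec_automata_numeral; infer_instance

-- ===== CLAIM (what is proved, stated in full; the proofs are below) =====
def Claim_equal_automata_numeral : Prop := ∀ (lexema : String), Dom_automata_numeral lexema → Spec_automata_numeral lexema (automata_numeral lexema)

-- ===== LEMMAS AND PROOFS =====
theorem pvLoopA_char (l : List Char) :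
    pvLoopA 0 l = if l = ['#'] then 1 else if l = [] then 0 else -1 := by
  match l with
  | [] => simp [pvLoopA]
  | [c] =>
    by_cases hc : c = '#'
    · subst hc; simp [pvLoopA, pvDeltaA, PySem.Dict.get?]
    · simp [pvLoopA, pvDeltaA, PySem.Dict.get?]
      rw [if_neg (fun h => hc h.symm), if_neg hc]
  | c :: d :: cs =>
    by_cases hc : c = '#'
    · subst hc; simp [pvLoopA, pvDeltaA, PySem.Dict.get?]
    · simp [pvLoopA, pvDeltaA, PySem.Dict.get?, Ne.symm hc]

-- ===== VERDICT (by name: the statement is the Claim_ definition above) =====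
theorem automata_numeral_spec : Claim_equal_automata_numeral := by
  intro lexema _
  unfold Spec_automata_numeral automata_numeral automata_numeral_alt
  rw [pvLoopA_char]
  split_ifs <;> simp_all [pvESTADO_FINAL, pvESTADO_NO_FINAL, pvESTADO_TRAMPA]
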